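-- pv_equiv track=rewrite | github.com/fernaldifz/classical-cryptography | src/oneTimePad.py | decryptTextOTP
-- ===== SOURCE A (Python) =====
-- def decryptTextOTP(encryptedString, key):
--     result = ""
--     filteredString = filterAlphabet(encryptedString)
--     for i in range(len(filteredString)):
--         char = (ord(filteredString[i].upper()) - ord(key[i].upper())) % 26
--         char += ord('A')
--         result += chr(char)
--     return result.lower()
--
-- def filterAlphabet(inputString):
--     alphabet = ""
--     for character in inputString:
--         if character.isalpha():
--             alphabet += character
--     return alphabet
-- ===== SOURCE B (Python) =====
-- def decryptTextOTP(encryptedString, key):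
--     out = []
--     j = 0
--     for c in encryptedString:
--         if c.isalpha():
--             out.append(chr((ord(c.upper()) - ord(key[j].upper())) % 26 + ord('a')))
--             j += 1
--     return ''.join(out)
-- ===== Notes on version B (the rewrite author's own statement) =====
-- stated objective: simpler
-- what changed: Replaces the two-pass structure (filterAlphabet pre-pass, then an indexed loop over the filtered string followed by a final .lower()) with a single fused pass over encryptedString that keeps its own key-position counter and emits lowercase letters directly, with no helper and no final lowercasing pass.
import Mathlib
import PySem

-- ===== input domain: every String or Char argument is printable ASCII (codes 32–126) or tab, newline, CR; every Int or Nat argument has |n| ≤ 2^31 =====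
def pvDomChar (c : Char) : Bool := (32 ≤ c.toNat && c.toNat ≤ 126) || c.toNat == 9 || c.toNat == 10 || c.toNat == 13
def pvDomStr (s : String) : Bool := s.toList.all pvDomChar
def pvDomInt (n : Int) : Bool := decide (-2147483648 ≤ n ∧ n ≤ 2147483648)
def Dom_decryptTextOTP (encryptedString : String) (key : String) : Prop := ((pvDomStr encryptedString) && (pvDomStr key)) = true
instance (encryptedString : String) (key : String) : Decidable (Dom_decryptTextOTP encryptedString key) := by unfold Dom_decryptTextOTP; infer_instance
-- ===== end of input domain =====

-- B fuses A's two passes (filterAlphabet, then an indexed decrypt loop plus a final .lower())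
-- into one pass with a key-position counter that emits lowercase letters directly (objective: simpler).

-- ===== PORT A =====
def filterAlphabet (inputString : String) : String :=
  String.ofList (inputString.toList.foldl
    (fun acc c => if PySem.Chars.isalpha c then acc ++ [c] else acc) [])

def decryptTextOTP (encryptedString : String) (key : String) : String :=
  String.ofList (PySem.Chars.lower
    ((PySem.List.pyRange 0 ((filterAlphabet encryptedString).toList.length : Int) 1).foldl
      (fun acc i =>
        acc ++ [Char.ofNat (PySem.Int.mod
          (((PySem.Chars.upperChar (PySem.List.pyGetD (filterAlphabet encryptedString).toList i ' ')).toNat : Int)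
            - ((PySem.Chars.upperChar (PySem.List.pyGetD key.toList i ' ')).toNat : Int)) 26
          + 65).toNat]) ([] : List Char)))

-- ===== PORT B =====
-- single fused pass: walk the characters, keep the key-position counter j, emit lowercase directly
def altGo (key : List Char) (cs : List Char) (j : Nat) : List Char :=
  match cs with
  | [] => []
  | c :: rest =>
    if PySem.Chars.isalpha c then
      Char.ofNat (PySem.Int.mod
        (((PySem.Chars.upperChar c).toNat : Int)
          - ((PySem.Chars.upperChar (PySem.List.pyGetD key (j : Int) ' ')).toNat : Int)) 26
        + 97).toNat
        :: altGo key rest (j + 1)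
    else altGo key rest j

def decryptTextOTP_alt (encryptedString : String) (key : String) : String :=
  String.ofList (altGo key.toList encryptedString.toList 0)

-- ===== PRECONDITION & SPEC =====
-- Pre_ excludes exactly the inputs on which Python A raises IndexError: a key shorter than the
-- number of alphabetic characters in encryptedString (Python B raises there too).
def Pre_decryptTextOTP (encryptedString : String) (key : String) : Prop :=
  (encryptedString.toList.filter PySem.Chars.isalpha).length ≤ key.toList.length
instance (encryptedString : String) (key : String) : Decidable (Pre_decryptTextOTP encryptedString key) := by unfold Pre_decryptTextOTP; infer_instance
def pvWitness_decryptTextOTP : String × String := ("Hi, OTP!", "keykey")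

def Spec_decryptTextOTP (encryptedString : String) (key : String) (out : String) : Prop := out = decryptTextOTP_alt encryptedString key
instance (encryptedString : String) (key : String) (out : String) : Decidable (Spec_decryptTextOTP encryptedString key out) := by unfold Spec_decryptTextOTP; infer_instance

-- ===== CLAIM (what is proved, stated in full; the proofs are below) =====
def Claim_equal_decryptTextOTP : Prop := ∀ (encryptedString : String) (key : String), Dom_decryptTextOTP encryptedString key → Pre_decryptTextOTP encryptedString key → Spec_decryptTextOTP encryptedString key (decryptTextOTP encryptedString key)

-- ===== LEMMAS AND PROOFS =====

-- the per-character decryption that B performs (lowercase output), key read at absolute position j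
def decChar (ks : List Char) (c : Char) (j : Nat) : Char :=
  Char.ofNat (PySem.Int.mod
    (((PySem.Chars.upperChar c).toNat : Int)
      - ((PySem.Chars.upperChar (ks.getD j ' ')).toNat : Int)) 26 + 97).toNat

lemma filterAlphabet_toList (s : String) :
    (filterAlphabet s).toList = s.toList.filter PySem.Chars.isalpha := by
  show (String.ofList _).toList = _
  rw [PySem.List.foldl_append_if PySem.Chars.isalpha (fun c => c)]
  simp

lemma lowerChar_shift_fin : ∀ m : Fin 26,
    PySem.Chars.lowerChar (Char.ofNat (m.val + 65)) = Char.ofNat (m.val + 97) := by decide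

lemma lowerChar_shift {m : Nat} (h : m < 26) :
    PySem.Chars.lowerChar (Char.ofNat (m + 65)) = Char.ofNat (m + 97) :=
  lowerChar_shift_fin ⟨m, h⟩

-- lowering A's per-character uppercase output gives B's per-character lowercase output
lemma lower_dec (ks : List Char) (c : Char) (j : Nat) :
    PySem.Chars.lowerChar (Char.ofNat (PySem.Int.mod
      (((PySem.Chars.upperChar c).toNat : Int)
        - ((PySem.Chars.upperChar (ks.getD j ' ')).toNat : Int)) 26 + 65).toNat)
    = decChar ks c j := by
  set x : Int := ((PySem.Chars.upperChar c).toNat : Int)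
      - ((PySem.Chars.upperChar (ks.getD j ' ')).toNat : Int) with hx
  have h0 : 0 ≤ PySem.Int.mod x 26 := PySem.Int.mod_nonneg x (by norm_num)
  have h1 : PySem.Int.mod x 26 < 26 := PySem.Int.mod_lt x (by norm_num)
  have e65 : (PySem.Int.mod x 26 + 65).toNat = (PySem.Int.mod x 26).toNat + 65 := by omega
  have e97 : (PySem.Int.mod x 26 + 97).toNat = (PySem.Int.mod x 26).toNat + 97 := by omega
  have hlt : (PySem.Int.mod x 26).toNat < 26 := by omega
  rw [decChar, ← hx, e65, e97, lowerChar_shift hlt]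

-- B's fused loop, characterised: it decrypts the alpha-filtered characters at key positions j, j+1, …
lemma altGo_eq (ks cs : List Char) (j : Nat) :
    altGo ks cs j = (List.range (cs.filter PySem.Chars.isalpha).length).map
      (fun k => decChar ks ((cs.filter PySem.Chars.isalpha).getD k ' ') (j + k)) := by
  induction cs generalizing j with
  | nil => simp [altGo]
  | cons c rest ih =>
    by_cases hc : PySem.Chars.isalpha c
    · simp only [altGo, hc, if_pos, List.filter_cons_of_pos hc, List.length_cons,
        List.range_succ_eq_map, List.map_cons, List.map_map, ih (j + 1)]
      congr 1
      · simp [decChar, PySem.List.pyGetD_natCast]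
      · apply List.map_congr_left
        intro m _
        simp only [Function.comp_def, List.getD_cons_succ]
        congr 1
        omega
    · simp only [altGo, hc, List.filter_cons_of_neg hc, ih j]
      rfl

-- A's indexed loop over the filtered string, rewritten as the same map (key position = index)
lemma portA_eq (e k : String) :
    decryptTextOTP e k = String.ofList ((List.range (e.toList.filter PySem.Chars.isalpha).length).map
      (fun i => decChar k.toList ((e.toList.filter PySem.Chars.isalpha).getD i ' ') i)) := by
  unfold decryptTextOTP
  rw [PySem.List.foldl_append_singleton_eq_map, filterAlphabet_toList, PySem.List.pyRange_one]
  congr 1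
  rw [PySem.Chars.lower, List.nil_append, List.map_map, List.map_map]
  apply List.map_congr_left
  intro i _
  simp only [Function.comp, zero_add,
    PySem.List.pyGetD_natCast]
  exact lower_dec k.toList _ i

-- ===== VERDICT (by name: the statement is the Claim_ definition above) =====
theorem decryptTextOTP_spec : Claim_equal_decryptTextOTP := by
  intro e k _ _
  show decryptTextOTP e k = decryptTextOTP_alt e k
  rw [portA_eq, decryptTextOTP_alt, altGo_eq]
  simp
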